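-- pv_equiv track=rewrite | github.com/Roeiazran/Codilty-Solutions | challenges/JurassicCode.py | solution
-- ===== SOURCE A (Python) =====
-- def solution(X, Y, colors):
--
--     n = len(X)
--     raduises = [0] * n
--
--     for i in range(n):
--         raduises[i] =  X[i] * X[i]  + Y[i] * Y[i]
--
--     tab = []
--
--     for i in range(n):
--         tab.append((raduises[i], colors[i]))
--
--     tab.sort()
--     r = g = 0
--     max_dots = 0
--
--     for i in range(n):
--
--         if tab[i][1] == 'G':
--             g += 1
--         else:
--             r += 1
--
--         if r == g and (i == n - 1 or tab[i][0] != tab[i + 1][0]):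
--             max_dots = r + g
--
--     return max_dots
-- ===== SOURCE B (Python) =====
-- def solution(X, Y, colors):
--     counts = {}
--     for x, y, c in zip(X, Y, colors):
--         rad = x * x + y * y
--         g0, r0 = counts.get(rad, (0, 0))
--         counts[rad] = (g0 + 1, r0) if c == 'G' else (g0, r0 + 1)
--     g = r = 0
--     max_dots = 0
--     for rad in sorted(counts):
--         dg, dr = counts[rad]
--         g += dg
--         r += dr
--         if r == g:
--             max_dots = 2 * r
--     return max_dots
-- ===== Notes on version B (the rewrite author's own statement) =====
-- stated objective: alternative
-- what changed: B groups points into a dict keyed by squared radius holding (green,red) counts and folds over the sorted unique radii adding whole groups at once, instead of sorting all n (radius,color) pairs and scanning them element by element with an index lookahead.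
import Mathlib
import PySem

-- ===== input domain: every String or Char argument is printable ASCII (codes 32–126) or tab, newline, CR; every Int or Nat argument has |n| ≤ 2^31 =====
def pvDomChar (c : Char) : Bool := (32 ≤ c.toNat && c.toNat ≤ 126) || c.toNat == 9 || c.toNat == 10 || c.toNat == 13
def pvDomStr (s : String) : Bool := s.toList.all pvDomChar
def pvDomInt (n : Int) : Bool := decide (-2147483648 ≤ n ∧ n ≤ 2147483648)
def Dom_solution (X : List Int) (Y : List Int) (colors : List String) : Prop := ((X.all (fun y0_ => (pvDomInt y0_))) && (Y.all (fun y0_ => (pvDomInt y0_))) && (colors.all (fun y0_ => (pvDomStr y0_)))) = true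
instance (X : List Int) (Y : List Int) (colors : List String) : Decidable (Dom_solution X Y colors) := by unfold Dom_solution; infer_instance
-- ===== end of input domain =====

-- B groups the points by squared radius in a dict of (green,red) counts and folds over the
-- sorted unique radii, adding whole groups at once; A sorts all n (radius,color) pairs and
-- scans them one by one with an index lookahead.  Objective: alternative algorithm.

-- ===== PORT A =====
-- the lookahead 'i == n - 1 or tab[i][0] != tab[i+1][0]' of A's final loop, on the rest of the list
def nextDiff (k : Int) : List (Int × String) → Bool
  | [] => true
  | q :: _ => k != q.1

-- A's final loop 'for i in range(n)', as structural recursion on the sorted list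
def solutionLoopA : List (Int × String) → Int → Int → Int → Int
  | [], _r, _g, max_dots => max_dots
  | p :: rest, r, g, max_dots =>
    let r' := if p.2 == "G" then r else r + 1
    let g' := if p.2 == "G" then g + 1 else g
    solutionLoopA rest r' g' (if r' = g' ∧ nextDiff p.1 rest = true then r' + g' else max_dots)

def solution (X : List Int) (Y : List Int) (colors : List String) : Int :=
  let n : Int := X.length
  -- raduises[i] = X[i]*X[i] + Y[i]*Y[i]
  let raduises : List Int := (PySem.List.pyRange 0 n 1).map
    (fun i => PySem.List.pyGetD X i 0 * PySem.List.pyGetD X i 0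
            + PySem.List.pyGetD Y i 0 * PySem.List.pyGetD Y i 0)
  -- tab.append((raduises[i], colors[i]))
  let tab : List (Int × String) := (PySem.List.pyRange 0 n 1).foldl
    (fun acc i => acc ++ [(PySem.List.pyGetD raduises i 0, PySem.List.pyGetD colors i "")]) []
  -- tab.sort()  — Python tuple order: first component, then second
  let tab2 := PySem.List.sorted2 tab (fun p => p.1) (fun p => p.2)
  solutionLoopA tab2 0 0 0

-- ===== PORT B =====
def solution_alt (X : List Int) (Y : List Int) (colors : List String) : Int :=
  -- counts[rad] = (greens, reds), built over zip(X, Y, colors)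
  let counts : PySem.Dict Int (Int × Int) :=
    (X.zip (Y.zip colors)).foldl
      (fun d t =>
        d.modify (t.1 * t.1 + t.2.1 * t.2.1) (0, 0)
          (fun gr => if t.2.2 == "G" then (gr.1 + 1, gr.2) else (gr.1, gr.2 + 1)))
      PySem.Dict.empty
  -- for rad in sorted(counts): add the whole group's counts, record 2*r when balanced
  let st := (PySem.List.sorted counts.keys (fun k => k)).foldl
      (fun (st : Int × Int × Int) k =>
        let gr := counts.getD k (0, 0)
        let g := st.1 + gr.1
        let r := st.2.1 + gr.2
        (g, r, if r = g then 2 * r else st.2.2))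
      (0, 0, 0)
  st.2.2

-- ===== PRECONDITION & SPEC =====
-- A indexes Y[i] and colors[i] for every i < len(X): it raises IndexError iff Y or colors is
-- shorter than X.  Pre_ excludes exactly those inputs; A returns on everything else.
def Pre_solution (X : List Int) (Y : List Int) (colors : List String) : Prop :=
  X.length ≤ Y.length ∧ X.length ≤ colors.length
instance (X : List Int) (Y : List Int) (colors : List String) : Decidable (Pre_solution X Y colors) := by unfold Pre_solution; infer_instance

def pvWitness_solution : List Int × List Int × List String := ([1, 0, 1], [0, 0, 0], ["G", "R", "G"])

def Spec_solution (X : List Int) (Y : List Int) (colors : List String) (out : Int) : Prop := out = solution_alt X Y colors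
instance (X : List Int) (Y : List Int) (colors : List String) (out : Int) : Decidable (Spec_solution X Y colors out) := by unfold Spec_solution; infer_instance

-- ===== CLAIM (what is proved, stated in full; the proofs are below) =====
def Claim_equal_solution : Prop := ∀ (X : List Int) (Y : List Int) (colors : List String), Dom_solution X Y colors → Pre_solution X Y colors → Spec_solution X Y colors (solution X Y colors)


-- ===== LEMMAS AND PROOFS =====

-- the list of (squared radius, color) pairs both programs are about
def tabOf (X : List Int) (Y : List Int) (colors : List String) : List (Int × String) :=
  (X.zip (Y.zip colors)).map (fun t => (t.1 * t.1 + t.2.1 * t.2.1, t.2.2))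

-- greens / reds with a given radius, and of a whole list (one radius group)
def cG (s : List (Int × String)) (k : Int) : Int := (s.countP (fun p => p.1 == k && p.2 == "G") : Int)
def cR (s : List (Int × String)) (k : Int) : Int := (s.countP (fun p => p.1 == k && p.2 != "G") : Int)
def gG (s : List (Int × String)) : Int := (s.countP (fun p => p.2 == "G") : Int)
def gR (s : List (Int × String)) : Int := (s.countP (fun p => p.2 != "G") : Int)

-- B's loop body, abstracted over the counts lookup
def bstep (cnt : Int → Int × Int) (st : Int × Int × Int) (k : Int) : Int × Int × Int :=
  let gr := cnt k
  let g := st.1 + gr.1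
  let r := st.2.1 + gr.2
  (g, r, if r = g then 2 * r else st.2.2)

lemma insertBy_pairwise {α : Type} (before : α → α → Bool) (R : α → α → Prop)
    (htrans : ∀ a b c, R a b → R b c → R a c)
    (h1 : ∀ a b, before a b = true → R a b) (h2 : ∀ a b, before a b = false → R b a) :
    ∀ (l : List α) (x : α), l.Pairwise R → (PySem.List.insertBy before x l).Pairwise R := by
  intro l
  induction l with
  | nil => intro x _; simp [PySem.List.insertBy]
  | cons y ys ih =>
    intro x hp
    rw [List.pairwise_cons] at hp
    obtain ⟨hy, hys⟩ := hp
    by_cases hb : before x y = true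
    · rw [show PySem.List.insertBy before x (y :: ys) = x :: y :: ys from by
        simp [PySem.List.insertBy, hb]]
      refine List.Pairwise.cons ?_ (List.Pairwise.cons hy hys)
      intro z hz
      rcases List.mem_cons.1 hz with rfl | hz
      · exact h1 _ _ hb
      · exact htrans _ _ _ (h1 _ _ hb) (hy _ hz)
    · rw [show PySem.List.insertBy before x (y :: ys) = y :: PySem.List.insertBy before x ys from by
        simp [PySem.List.insertBy, hb]]
      refine List.Pairwise.cons ?_ (ih x hys)
      intro z hz
      rcases (PySem.List.mem_insertBy (before := before) (x := x) (ys := ys) (y := z)).1 hz with rfl | hz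
      · exact h2 _ _ (by simpa using hb)
      · exact hy _ hz

lemma foldl_insertBy_pairwise {α : Type} (before : α → α → Bool) (R : α → α → Prop)
    (htrans : ∀ a b c, R a b → R b c → R a c)
    (h1 : ∀ a b, before a b = true → R a b) (h2 : ∀ a b, before a b = false → R b a) :
    ∀ (t acc : List α), acc.Pairwise R → (t.foldl (fun acc x => PySem.List.insertBy before x acc) acc).Pairwise R := by
  intro t
  induction t with
  | nil => intro acc h; simpa
  | cons x xs ih =>
    intro acc h
    exact ih _ (insertBy_pairwise before R htrans h1 h2 acc x h)

lemma sorted2_fst_pairwise (t : List (Int × String)) :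
    (PySem.List.sorted2 t (fun p => p.1) (fun p => p.2)).Pairwise (fun a b => a.1 ≤ b.1) := by
  unfold PySem.List.sorted2
  simp only [if_neg (by simp : ¬ (false = true))]
  refine foldl_insertBy_pairwise
    (fun a b => decide (a.1 < b.1) || !decide (b.1 < a.1) && decide (a.2 < b.2))
    (fun a b => a.1 ≤ b.1) (fun a b c => le_trans) ?_ ?_ t [] List.Pairwise.nil
  · intro a b hb
    rcases Bool.or_eq_true_iff.1 hb with h | h
    · have := of_decide_eq_true h; omega
    · have h1 := (Bool.and_eq_true_iff.1 h).1
      have h2 : decide (b.1 < a.1) = false := by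
        cases hd : decide (b.1 < a.1) <;> simp [hd] at h1 ⊢
      have := of_decide_eq_false h2
      omega
  · intro a b hb
    have := of_decide_eq_false (Bool.or_eq_false_iff.1 hb).1
    omega

lemma loopA_cons (p : Int × String) (rest : List (Int × String)) (r g m : Int) :
    solutionLoopA (p :: rest) r g m =
      solutionLoopA rest (if p.2 == "G" then r else r + 1) (if p.2 == "G" then g + 1 else g)
        (if (if p.2 == "G" then r else r + 1) = (if p.2 == "G" then g + 1 else g) ∧ nextDiff p.1 rest = true
         then (if p.2 == "G" then r else r + 1) + (if p.2 == "G" then g + 1 else g) else m) := rfl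

lemma loopA_congr (s : List (Int × String)) {r r' g g' m m' : Int}
    (h1 : r = r') (h2 : g = g') (h3 : m = m') :
    solutionLoopA s r g m = solutionLoopA s r' g' m' := by subst h1; subst h2; subst h3; rfl

lemma loopA_group : ∀ (grp rest : List (Int × String)) (k : Int), grp ≠ [] →
    (∀ q ∈ grp, q.1 = k) → (∀ q ∈ rest, q.1 ≠ k) →
    ∀ r g m, solutionLoopA (grp ++ rest) r g m =
      solutionLoopA rest (r + gR grp) (g + gG grp)
        (if r + gR grp = g + gG grp then (r + gR grp) + (g + gG grp) else m) := by
  intro grp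
  induction grp with
  | nil => intro rest k h; exact absurd rfl h
  | cons q grp' ih =>
    intro rest k _ hgrp hrest r g m
    have hq : q.1 = k := hgrp q (by simp)
    rcases grp' with _ | ⟨q2, grp''⟩
    · -- grp = [q]
      have hbound : nextDiff q.1 rest = true := by
        rcases rest with _ | ⟨h, rs⟩
        · rfl
        · have : h.1 ≠ k := hrest h (by simp)
          simp [nextDiff, bne, hq]; omega
      rw [List.singleton_append, loopA_cons, hbound]
      by_cases hc : (q.2 == "G") = true
      · have hceq : q.2 = "G" := by simpa using hc
        have e1 : gR [q] = 0 := by simp [gR, hceq]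
        have e2 : gG [q] = 1 := by simp [gG, hceq]
        rw [e1, e2]
        simp only [hc, if_true, and_true]
        refine loopA_congr _ (by omega) (by omega) ?_
        split_ifs <;> omega
      · rw [Bool.not_eq_true] at hc
        have hcne : ¬ q.2 = "G" := by simpa using hc
        have e1 : gR [q] = 1 := by simp [gR, hcne]
        have e2 : gG [q] = 0 := by simp [gG, hcne]
        rw [e1, e2]
        simp only [hc, Bool.false_eq_true, if_false, and_true]
        refine loopA_congr _ (by omega) (by omega) ?_
        split_ifs <;> omega
    · -- grp = q :: q2 :: grp''
      have hq2 : q2.1 = k := hgrp q2 (by simp)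
      have hbound : nextDiff q.1 (q2 :: grp'' ++ rest) = false := by
        simp [nextDiff, bne, hq, hq2]
      rw [List.cons_append, loopA_cons, hbound,
        if_neg (by simp : ¬ ((if (q.2 == "G") = true then r else r + 1) = (if (q.2 == "G") = true then g + 1 else g) ∧ false = true))]
      rw [ih rest k (by simp) (fun p hp => hgrp p (by simp [hp])) hrest]
      by_cases hc : (q.2 == "G") = true
      · have hceq : q.2 = "G" := by simpa using hc
        have e1 : gR (q :: q2 :: grp'') = gR (q2 :: grp'') := by simp [gR, List.countP_cons, hceq]
        have e2 : gG (q :: q2 :: grp'') = gG (q2 :: grp'') + 1 := by simp [gG, List.countP_cons, hceq]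
        rw [e1, e2]
        simp only [hc, if_true]
        refine loopA_congr _ (by omega) (by omega) ?_
        split_ifs <;> omega
      · rw [Bool.not_eq_true] at hc
        have hcne : ¬ q.2 = "G" := by simpa using hc
        have e1 : gR (q :: q2 :: grp'') = gR (q2 :: grp'') + 1 := by simp [gR, List.countP_cons, hcne]
        have e2 : gG (q :: q2 :: grp'') = gG (q2 :: grp'') := by simp [gG, List.countP_cons, hcne]
        rw [e1, e2]
        simp only [hc, Bool.false_eq_true, if_false]
        refine loopA_congr _ (by omega) (by omega) ?_
        split_ifs <;> omega

-- counts with a given radius restricted to a group / a remainder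
lemma cG_split (grp rest : List (Int × String)) (k' : Int) :
    cG (grp ++ rest) k' = cG grp k' + cG rest k' := by
  simp [cG, List.countP_append]

lemma cR_split (grp rest : List (Int × String)) (k' : Int) :
    cR (grp ++ rest) k' = cR grp k' + cR rest k' := by
  simp [cR, List.countP_append]

lemma cG_eq_gG (grp : List (Int × String)) (k : Int) (h : ∀ q ∈ grp, q.1 = k) :
    cG grp k = gG grp := by
  unfold cG gG
  congr 1
  apply List.countP_congr
  intro p hp
  simp [h p hp]

lemma cR_eq_gR (grp : List (Int × String)) (k : Int) (h : ∀ q ∈ grp, q.1 = k) :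
    cR grp k = gR grp := by
  unfold cR gR
  congr 1
  apply List.countP_congr
  intro p hp
  simp [h p hp]

lemma cG_zero (l : List (Int × String)) (k : Int) (h : ∀ q ∈ l, q.1 ≠ k) : cG l k = 0 := by
  unfold cG
  norm_cast
  rw [List.countP_eq_zero]
  intro p hp
  simp [h p hp]

lemma cR_zero (l : List (Int × String)) (k : Int) (h : ∀ q ∈ l, q.1 ≠ k) : cR l k = 0 := by
  unfold cR
  norm_cast
  rw [List.countP_eq_zero]
  intro p hp
  simp [h p hp]

lemma dropWhile_head_false {α : Type} (p : α → Bool) :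
    ∀ (l : List α) (h : α) (rs : List α), l.dropWhile p = h :: rs → p h = false := by
  intro l
  induction l with
  | nil => intro h rs he; simp at he
  | cons a t ih =>
    intro h rs he
    rw [List.dropWhile_cons] at he
    by_cases hp : p a = true
    · rw [if_pos hp] at he; exact ih _ _ he
    · rw [if_neg hp] at he
      injection he with h1 _
      rw [← h1]
      simpa using hp

lemma loopA_eq : ∀ (n : Nat) (s : List (Int × String)) (ks : List Int), s.length ≤ n →
    s.Pairwise (fun a b => a.1 ≤ b.1) →
    ks.Pairwise (· < ·) →
    (∀ x, x ∈ ks ↔ x ∈ s.map (fun p => p.1)) →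
    ∀ g r m, solutionLoopA s r g m =
      (ks.foldl (bstep (fun k => (cG s k, cR s k))) (g, r, m)).2.2 := by
  intro n
  induction n with
  | zero =>
    intro s ks hlen _ _ hmem g r m
    have hs : s = [] := List.eq_nil_of_length_eq_zero (Nat.le_zero.1 hlen)
    subst hs
    have hks : ks = [] := by
      cases ks with
      | nil => rfl
      | cons a t => exact absurd ((hmem a).1 (by simp)) (by simp)
    subst hks
    rfl
  | succ n ih =>
    intro s ks hlen hsort hks hmem g r m
    cases hs : s with
    | nil =>
      subst hs
      have hks0 : ks = [] := by
        cases ks with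
        | nil => rfl
        | cons a t => exact absurd ((hmem a).1 (by simp)) (by simp)
      subst hks0; rfl
    | cons p s' =>
      subst hs
      set k := p.1 with hk
      set grp := (p :: s').takeWhile (fun q => q.1 == k) with hgrp_def
      set rest := (p :: s').dropWhile (fun q => q.1 == k) with hrest_def
      have hsplit : grp ++ rest = p :: s' := List.takeWhile_append_dropWhile
      have hgrp_mem : ∀ q ∈ grp, q.1 = k := by
        intro q hq
        have := List.mem_takeWhile_imp hq
        simpa using this
      have hgrp_ne : grp ≠ [] := by
        rw [hgrp_def, List.takeWhile_cons]
        simp [hk]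
      -- every element of rest has radius > k
      have hrest_gt : ∀ q ∈ rest, k < q.1 := by
        have hpw : (grp ++ rest).Pairwise (fun a b => a.1 ≤ b.1) := by rw [hsplit]; exact hsort
        rw [List.pairwise_append] at hpw
        obtain ⟨hg1, hr1, hcross⟩ := hpw
        intro q hq
        -- k ≤ q.1 from cross (grp nonempty, all = k)
        obtain ⟨p0, hp0⟩ := List.exists_mem_of_ne_nil grp hgrp_ne
        have hle : k ≤ q.1 := by
          have := hcross p0 hp0 q hq
          rw [hgrp_mem p0 hp0] at this
          exact this
        cases hrst : rest with
        | nil => rw [hrst] at hq; simp at hq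
        | cons h rs =>
          have hhne : h.1 ≠ k := by
            have := dropWhile_head_false (fun (q : Int × String) => q.1 == k) (p :: s') h rs
              (hrest_def.symm.trans hrst)
            simpa using this
          have hhle : k ≤ h.1 := by
            have := hcross p0 hp0 h (by rw [hrst]; simp)
            rw [hgrp_mem p0 hp0] at this
            exact this
          rw [hrst] at hq
          rcases List.mem_cons.1 hq with rfl | hq2
          · omega
          · have : h.1 ≤ q.1 := by
              have hpr : rest.Pairwise (fun a b => a.1 ≤ b.1) := hr1
              rw [hrst, List.pairwise_cons] at hpr
              exact hpr.1 q hq2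
            omega
      have hrest_ne : ∀ q ∈ rest, q.1 ≠ k := fun q hq => by
        have := hrest_gt q hq; omega
      -- k is in ks and is its head
      have hkmem : k ∈ ks := (hmem k).2 (List.mem_map.2 ⟨p, by simp, hk.symm⟩)
      obtain ⟨k0, ks', hks0⟩ : ∃ k0 ks', ks = k0 :: ks' := by
        cases ks with
        | nil => simp at hkmem
        | cons a t => exact ⟨a, t, rfl⟩
      have hk0 : k0 = k := by
        by_contra hne
        have hk0mem : k0 ∈ (p :: s').map (fun p => p.1) := (hmem k0).1 (by rw [hks0]; simp)
        -- k0 is a radius of s; radii of s are k (grp) or > k (rest)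
        have hk0k : k ≤ k0 := by
          rw [← hsplit] at hk0mem
          rw [List.map_append, List.mem_append] at hk0mem
          rcases hk0mem with hm | hm
          · obtain ⟨q, hq, rfl⟩ := List.mem_map.1 hm
            rw [hgrp_mem q hq]
          · obtain ⟨q, hq, rfl⟩ := List.mem_map.1 hm
            exact le_of_lt (hrest_gt q hq)
        -- but k ∈ ks = k0 :: ks', k ≠ k0, so k0 < k
        rw [hks0] at hkmem hks
        rcases List.mem_cons.1 hkmem with h1 | h1
        · exact hne h1.symm
        · rw [List.pairwise_cons] at hks
          have := hks.1 k h1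
          omega
      subst hk0
      subst hks0
      rw [List.pairwise_cons] at hks
      -- properties of ks'
      have hks'_pw : ks'.Pairwise (· < ·) := hks.2
      have hks'_mem : ∀ x, x ∈ ks' ↔ x ∈ rest.map (fun p => p.1) := by
        intro x
        constructor
        · intro hx
          have hxk : k < x := hks.1 x hx
          have : x ∈ (p :: s').map (fun p => p.1) := (hmem x).1 (by simp [hx])
          rw [← hsplit, List.map_append, List.mem_append] at this
          rcases this with hm | hm
          · obtain ⟨q, hq, rfl⟩ := List.mem_map.1 hm
            rw [hgrp_mem q hq] at hxk
            omega
          · exact hm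
        · intro hx
          obtain ⟨q, hq, rfl⟩ := List.mem_map.1 hx
          have hqs : q.1 ∈ (p :: s').map (fun p => p.1) := by
            rw [← hsplit, List.map_append, List.mem_append]
            exact Or.inr (List.mem_map_of_mem hq)
          have := (hmem q.1).2 hqs
          rcases List.mem_cons.1 this with h1 | h1
          · exact absurd h1 (hrest_ne q hq)
          · exact h1
      -- run A through the first group
      have hiter : solutionLoopA (p :: s') r g m =
          solutionLoopA rest (r + gR grp) (g + gG grp)
            (if r + gR grp = g + gG grp then (r + gR grp) + (g + gG grp) else m) := by
        rw [← hsplit]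
        exact loopA_group grp rest k hgrp_ne hgrp_mem hrest_ne r g m
      rw [hiter]
      -- rest is shorter
      have hrlen : rest.length ≤ n := by
        have h1 : grp.length + rest.length = s'.length + 1 := by
          rw [← List.length_append, hsplit]; simp
        have h2 : 0 < grp.length := List.length_pos_of_ne_nil hgrp_ne
        have h3 : s'.length + 1 ≤ n + 1 := by simpa using hlen
        omega
      have hrest_sort : rest.Pairwise (fun a b => a.1 ≤ b.1) := by
        have hpw : (grp ++ rest).Pairwise (fun a b => a.1 ≤ b.1) := by rw [hsplit]; exact hsort
        rw [List.pairwise_append] at hpw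
        exact hpw.2.1
      rw [ih rest ks' hrlen hrest_sort hks'_pw hks'_mem]
      -- now match B's first step and the congruence over ks'
      rw [List.foldl_cons]
      have hcG : cG (p :: s') k = gG grp := by
        rw [← hsplit, cG_split, cG_eq_gG grp k hgrp_mem, cG_zero rest k hrest_ne, add_zero]
      have hcR : cR (p :: s') k = gR grp := by
        rw [← hsplit, cR_split, cR_eq_gR grp k hgrp_mem, cR_zero rest k hrest_ne, add_zero]
      have hstep : bstep (fun k' => (cG (p :: s') k', cR (p :: s') k')) (g, r, m) k =
          (g + gG grp, r + gR grp,
            if r + gR grp = g + gG grp then (r + gR grp) + (g + gG grp) else m) := by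
        simp only [bstep, hcG, hcR]
        split_ifs <;> simp only [Prod.mk.injEq, true_and] <;> omega
      rw [hstep]
      have hfold : List.foldl (bstep (fun k' => (cG rest k', cR rest k')))
            (g + gG grp, r + gR grp,
              if r + gR grp = g + gG grp then (r + gR grp) + (g + gG grp) else m) ks'
          = List.foldl (bstep (fun k' => (cG (p :: s') k', cR (p :: s') k')))
            (g + gG grp, r + gR grp,
              if r + gR grp = g + gG grp then (r + gR grp) + (g + gG grp) else m) ks' := by
        apply PySem.List.foldl_congr_mem
        intro acc x hx
        have hxk : x ≠ k := by
          have := hks.1 x hx; omega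
        have hzG : cG grp x = 0 := cG_zero grp x (fun q hq => by rw [hgrp_mem q hq]; omega)
        have hzR : cR grp x = 0 := cR_zero grp x (fun q hq => by rw [hgrp_mem q hq]; omega)
        have e1 : cG (p :: s') x = cG rest x := by rw [← hsplit, cG_split, hzG, zero_add]
        have e2 : cR (p :: s') x = cR rest x := by rw [← hsplit, cR_split, hzR, zero_add]
        simp only [bstep, e1, e2]
      rw [hfold]

lemma build_getD : ∀ (t : List (Int × String)) (d : PySem.Dict Int (Int × Int)) (k : Int),
    (t.foldl (fun d p => d.modify p.1 (0, 0)
        (fun gr => if p.2 == "G" then (gr.1 + 1, gr.2) else (gr.1, gr.2 + 1))) d).getD k (0, 0)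
      = ((d.getD k (0, 0)).1 + cG t k, (d.getD k (0, 0)).2 + cR t k) := by
  intro t
  induction t with
  | nil => intro d k; simp [cG, cR]
  | cons p t ih =>
    intro d k
    rw [List.foldl_cons, ih, PySem.Dict.getD_modify]
    by_cases hk : k = p.1
    · subst hk
      rw [if_pos rfl]
      by_cases hc : (p.2 == "G") = true
      · have hceq : p.2 = "G" := by simpa using hc
        have e1 : cG (p :: t) p.1 = 1 + cG t p.1 := by
          simp only [cG, List.countP_cons]
          have hcond : (p.1 == p.1 && p.2 == "G") = true := by simp [hceq]
          rw [hcond]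
          simp
          try omega
        have e2 : cR (p :: t) p.1 = cR t p.1 := by
          simp [cR, hceq]
        rw [if_pos hc, e1, e2]
        simp only [Prod.mk.injEq]
        constructor <;> first | trivial | ring
      · have hcne : ¬ p.2 = "G" := by
          intro he; exact hc (by simp [he])
        have e1 : cG (p :: t) p.1 = cG t p.1 := by
          simp [cG, hcne]
        have e2 : cR (p :: t) p.1 = 1 + cR t p.1 := by
          simp only [cR, List.countP_cons]
          have hcond : (p.1 == p.1 && p.2 != "G") = true := by simp [hcne]
          rw [hcond]
          simp
          try omega
        rw [if_neg hc, e1, e2]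
        simp only [Prod.mk.injEq]
        constructor <;> first | trivial | ring
    · rw [if_neg hk]
      have hne : ¬ (p.1 == k) = true := by
        intro he
        have hpk : p.1 = k := by simpa using he
        exact hk hpk.symm
      have e1 : cG (p :: t) k = cG t k := by
        simp only [cG, List.countP_cons]
        have hcond : (p.1 == k && p.2 == "G") = false := by
          simp only [Bool.and_eq_false_iff]
          left; simpa using hne
        rw [hcond]; simp
      have e2 : cR (p :: t) k = cR t k := by
        simp only [cR, List.countP_cons]
        have hcond : (p.1 == k && p.2 != "G") = false := by
          simp only [Bool.and_eq_false_iff]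
          left; simpa using hne
        rw [hcond]; simp
      rw [e1, e2]

lemma tabA_eq (X : List Int) (Y : List Int) (colors : List String)
    (h1 : X.length ≤ Y.length) (h2 : X.length ≤ colors.length) :
    ((PySem.List.pyRange 0 (X.length : Int) 1).map
      (fun i => (PySem.List.pyGetD ((PySem.List.pyRange 0 (X.length : Int) 1).map
          (fun i => PySem.List.pyGetD X i 0 * PySem.List.pyGetD X i 0
                  + PySem.List.pyGetD Y i 0 * PySem.List.pyGetD Y i 0)) i 0,
        PySem.List.pyGetD colors i ""))) =
      (X.zip (Y.zip colors)).map (fun t => (t.1 * t.1 + t.2.1 * t.2.1, t.2.2)) := by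
  apply List.ext_getElem
  · simp [PySem.List.length_pyRange_one, List.length_zip]
    omega
  · intro j hj1 hj2
    have hjX : j < X.length := by
      simp [List.length_zip] at hj2; omega
    have hjY : j < Y.length := by omega
    have hjC : j < colors.length := by omega
    rw [List.getElem_map, List.getElem_map, PySem.List.getElem_pyRange_one]
    have hidx : (0 : Int) + (j : Int) = (j : Int) := by omega
    rw [hidx]
    rw [PySem.List.pyGetD_map_pyRange_of_nonneg _ _ _ _ (by positivity) (by exact_mod_cast hjX)]
    rw [List.getElem_zip, List.getElem_zip]
    simp only [PySem.List.pyGetD_natCast]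
    rw [List.getD_eq_getElem _ _ hjX, List.getD_eq_getElem _ _ hjY, List.getD_eq_getElem _ _ hjC]

theorem final (X : List Int) (Y : List Int) (colors : List String)
    (h1 : X.length ≤ Y.length) (h2 : X.length ≤ colors.length) :
    solution X Y colors = solution_alt X Y colors := by
  -- A side
  have hA : solution X Y colors =
      solutionLoopA (PySem.List.sorted2 (tabOf X Y colors) (fun p => p.1) (fun p => p.2)) 0 0 0 := by
    simp only [solution]
    rw [PySem.List.foldl_append_singleton_eq_map, List.nil_append, tabA_eq X Y colors h1 h2]
    rfl
  -- B side
  set pts := X.zip (Y.zip colors) with hpts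
  set counts : PySem.Dict Int (Int × Int) :=
    pts.foldl
      (fun d t =>
        d.modify (t.1 * t.1 + t.2.1 * t.2.1) (0, 0)
          (fun gr => if t.2.2 == "G" then (gr.1 + 1, gr.2) else (gr.1, gr.2 + 1)))
      PySem.Dict.empty with hcounts
  have hB : solution_alt X Y colors =
      ((PySem.List.sorted counts.keys (fun k => k)).foldl
        (bstep (fun k => counts.getD k (0, 0))) (0, 0, 0)).2.2 := rfl
  -- counts as a fold over the tab list
  have hcounts_t : counts = (tabOf X Y colors).foldl
      (fun d p => d.modify p.1 (0, 0)
        (fun gr => if p.2 == "G" then (gr.1 + 1, gr.2) else (gr.1, gr.2 + 1)))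
      PySem.Dict.empty := by
    rw [tabOf, List.foldl_map]
  have hgetD : ∀ k, counts.getD k (0, 0) = (cG (tabOf X Y colors) k, cR (tabOf X Y colors) k) := by
    intro k
    rw [hcounts_t, build_getD]
    simp
  -- keys
  have hkeys : counts.keys = PySem.Set.ofList ((tabOf X Y colors).map (fun p => p.1)) := by
    rw [hcounts]
    rw [PySem.Dict.keys_foldl_modify_key pts (fun t => t.1 * t.1 + t.2.1 * t.2.1) (0, 0)
      (fun _ t gr => if t.2.2 == "G" then (gr.1 + 1, gr.2) else (gr.1, gr.2 + 1)) PySem.Dict.empty]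
    rw [PySem.Dict.keys_empty, PySem.Set.update_nil_left]
    congr 1
    rw [tabOf, List.map_map]; rfl
  -- the sorted key list
  have hks_pw : (PySem.List.sorted counts.keys (fun k => k)).Pairwise (· < ·) := by
    rw [hkeys]
    exact PySem.List.sorted_ofList_pairwise_lt _
  have hperm := PySem.List.sorted2_perm (tabOf X Y colors) (fun p => p.1) (fun p => p.2) false
  have hks_mem : ∀ x, x ∈ PySem.List.sorted counts.keys (fun k => k) ↔
      x ∈ (PySem.List.sorted2 (tabOf X Y colors) (fun p => p.1) (fun p => p.2)).map (fun p => p.1) := by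
    intro x
    rw [PySem.List.mem_sorted, hkeys, PySem.Set.mem_ofList]
    exact (List.Perm.mem_iff (List.Perm.map _ hperm)).symm
  -- counts agree with the sorted tab's counts
  have hcntfun : (fun k => counts.getD k (0, 0)) =
      (fun k => (cG (PySem.List.sorted2 (tabOf X Y colors) (fun p => p.1) (fun p => p.2)) k,
                 cR (PySem.List.sorted2 (tabOf X Y colors) (fun p => p.1) (fun p => p.2)) k)) := by
    funext k
    rw [hgetD k]
    unfold cG cR
    rw [List.Perm.countP_eq _ hperm, List.Perm.countP_eq _ hperm]
  rw [hA, hB, hcntfun]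
  exact loopA_eq (PySem.List.sorted2 (tabOf X Y colors) (fun p => p.1) (fun p => p.2)).length
    _ _ (le_refl _) (sorted2_fst_pairwise _) hks_pw hks_mem 0 0 0

-- ===== VERDICT (by name: the statement is the Claim_ definition above) =====
theorem solution_spec : Claim_equal_solution := by
  intro X Y colors _hdom hpre
  unfold Spec_solution
  exact final X Y colors hpre.1 hpre.2
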